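-- pv_equiv track=rewrite | github.com/LouisP96/gitlab-hybrid-rag | src/processing/utils.py | _parse_simple_docstring
-- ===== SOURCE A (Python) =====
-- from typing import Dict, Tuple, List, Any
--
-- def _parse_simple_docstring(docstring: str) -> Dict[str, Any]:
--     """Parse a simple docstring into summary and description."""
--     lines = docstring.split("\n")
--
--     # First line is summary/title
--     summary = lines[0].strip() if lines else ""
--
--     # Rest is description (skip blank line if present)
--     description_lines = []
--     for i in range(1, len(lines)):
--         if i == 1 and not lines[i].strip():
--             continue  # Skip first blank line
--         description_lines.append(lines[i])
--
--     description = "\n".join(description_lines).strip()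
--
--     return {"summary": summary, "description": description if description else None}
-- ===== SOURCE B (Python) =====
-- from typing import Dict, Any
--
-- def _parse_simple_docstring(docstring: str) -> Dict[str, Any]:
--     """Parse a simple docstring into summary and description."""
--     parts = docstring.split("\n", 1)
--     summary = parts[0].strip()
--     description = parts[1].strip() if len(parts) > 1 else ""
--     return {"summary": summary, "description": description if description else None}
-- ===== Notes on version B (the rewrite author's own statement) =====
-- stated objective: simpler
-- what changed: Replaces the full line split plus an indexed loop with a blank-line-skip branch by a single bounded split at the first newline (maxsplit=1) and two strips; the skip branch is redundant because the final strip removes a leading blank line anyway.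
import Mathlib
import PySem

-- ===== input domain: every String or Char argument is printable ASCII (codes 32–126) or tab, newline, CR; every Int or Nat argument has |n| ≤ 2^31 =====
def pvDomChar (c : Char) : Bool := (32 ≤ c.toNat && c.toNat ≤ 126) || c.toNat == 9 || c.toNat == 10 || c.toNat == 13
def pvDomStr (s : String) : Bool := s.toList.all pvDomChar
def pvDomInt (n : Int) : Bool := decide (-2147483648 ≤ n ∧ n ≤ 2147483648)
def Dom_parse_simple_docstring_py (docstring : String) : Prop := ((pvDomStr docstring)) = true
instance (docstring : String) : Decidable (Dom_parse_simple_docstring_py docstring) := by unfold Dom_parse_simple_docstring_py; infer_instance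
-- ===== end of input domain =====

-- B replaces A's full line split plus indexed loop (with its redundant blank-line skip) by one bounded split("\n", 1) and two strips; objective: simpler.


-- ===== PORT A =====
-- lines[0] / lines[i] are ported with pyGetD (always in range: split never returns an empty
-- list and the loop indices come from range(1, len(lines))), so A is total.
def parse_simple_docstring_py (docstring : String) : List (String × Option String) :=
  let lines := PySem.Chars.splitOn docstring.toList ['\n']
  let summary := if lines ≠ [] then PySem.Chars.strip (PySem.List.pyGetD lines 0 []) else []
  let description_lines := (PySem.List.pyRange 1 lines.length 1).foldl
    (fun acc i =>
      if i = 1 ∧ PySem.Chars.strip (PySem.List.pyGetD lines i []) = [] then acc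
      else acc ++ [PySem.List.pyGetD lines i []]) ([] : List (List Char))
  let description := PySem.Chars.strip (PySem.Chars.join ['\n'] description_lines)
  [("summary", some (String.ofList summary)),
   ("description", if description ≠ [] then some (String.ofList description) else none)]

-- ===== PORT B =====
-- parts[0] is ported with headD (split always returns at least one piece), so B is total.
def parse_simple_docstring_py_alt (docstring : String) : List (String × Option String) :=
  let parts := PySem.Chars.splitOnMax docstring.toList ['\n'] 1
  let summary := PySem.Chars.strip (parts.headD [])
  let description := if 1 < parts.length then PySem.Chars.strip (PySem.List.pyGetD parts 1 []) else []
  [("summary", some (String.ofList summary)),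
   ("description", if description ≠ [] then some (String.ofList description) else none)]

-- ===== PRECONDITION & SPEC =====
def Spec_parse_simple_docstring_py (docstring : String) (out : List (String × Option String)) : Prop := out = parse_simple_docstring_py_alt docstring
instance (docstring : String) (out : List (String × Option String)) : Decidable (Spec_parse_simple_docstring_py docstring out) := by unfold Spec_parse_simple_docstring_py; infer_instance

-- ===== CLAIM (what is proved, stated in full; the proofs are below) =====
def Claim_equal_parse_simple_docstring_py : Prop := ∀ (docstring : String), Dom_parse_simple_docstring_py docstring → Spec_parse_simple_docstring_py docstring (parse_simple_docstring_py docstring)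

-- ===== LEMMAS AND PROOFS =====

def spAll : List Char → List Char × List (List Char)
  | [] => ([], [])
  | c :: r =>
    let p := spAll r
    if c = '\n' then ([], p.1 :: p.2) else (c :: p.1, p.2)

theorem go_spec : ∀ (fuel : Nat) (l cur : List Char) (acc : List (List Char)),
    l.length ≤ fuel →
    PySem.Chars.splitOn.go ['\n'] fuel l cur acc
      = acc.reverse ++ (cur.reverse ++ (spAll l).1) :: (spAll l).2 := by
  intro fuel
  induction fuel with
  | zero =>
    intro l cur acc h
    have : l = [] := by cases l <;> simp_all
    subst this
    simp [PySem.Chars.splitOn.go, spAll]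
  | succ n ih =>
    intro l cur acc h
    cases l with
    | nil => simp [PySem.Chars.splitOn.go, spAll]
    | cons c rest =>
      by_cases hc : c = '\n'
      · subst hc
        rw [PySem.Chars.splitOn.go]
        simp only [List.isPrefixOf, spAll]
        rw [if_pos (by simp)]
        simp [ih rest [] _ (by simpa using h)]
      · rw [PySem.Chars.splitOn.go]
        rw [if_neg (by simp [List.isPrefixOf]; exact fun h2 => hc h2.symm)]
        rw [ih rest (c :: cur) acc (by simpa using h)]
        simp [spAll, hc]

theorem splitOn_eq (s : List Char) :
    PySem.Chars.splitOn s ['\n'] = (spAll s).1 :: (spAll s).2 := by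
  rw [PySem.Chars.splitOn, go_spec (s.length + 1) s [] [] (by omega)]
  simp

def spOne : List Char → List Char × Option (List Char)
  | [] => ([], none)
  | c :: r =>
    let p := spOne r
    if c = '\n' then ([], some r) else (c :: p.1, p.2)

theorem goM0 : ∀ (fuel : Nat) (l cur : List Char) (acc : List (List Char)),
    PySem.Chars.splitOnMax.go ['\n'] fuel 0 l cur acc = acc.reverse ++ [cur.reverse ++ l] := by
  intro fuel l cur acc
  cases fuel with
  | zero => rw [PySem.Chars.splitOnMax.go]; simp
  | succ n =>
    cases l with
    | nil => rw [PySem.Chars.splitOnMax.go]; simp; omega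
    | cons c rest => rw [PySem.Chars.splitOnMax.go]; simp

theorem goM1 : ∀ (fuel : Nat) (l cur : List Char) (acc : List (List Char)),
    l.length ≤ fuel →
    PySem.Chars.splitOnMax.go ['\n'] fuel 1 l cur acc
      = acc.reverse ++ (cur.reverse ++ (spOne l).1) :: (spOne l).2.toList := by
  intro fuel
  induction fuel with
  | zero =>
    intro l cur acc h
    have : l = [] := by cases l <;> simp_all
    subst this
    rw [PySem.Chars.splitOnMax.go]; simp [spOne]
  | succ n ih =>
    intro l cur acc h
    cases l with
    | nil => rw [PySem.Chars.splitOnMax.go]; simp [spOne]; omega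
    | cons c rest =>
      by_cases hc : c = '\n'
      · subst hc
        rw [PySem.Chars.splitOnMax.go]
        rw [if_neg (by omega), if_pos (by simp [List.isPrefixOf])]
        simp only [Nat.sub_self]
        rw [goM0]
        simp [spOne]
      · rw [PySem.Chars.splitOnMax.go]
        rw [if_neg (by omega), if_neg (by simp [List.isPrefixOf]; exact fun h2 => hc h2.symm)]
        rw [ih rest (c :: cur) acc (by simpa using h)]
        simp [spOne, hc]

theorem splitOnMax_eq (s : List Char) :
    PySem.Chars.splitOnMax s ['\n'] 1 = (spOne s).1 :: (spOne s).2.toList := by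
  rw [PySem.Chars.splitOnMax]
  rw [if_neg (by norm_num)]
  norm_num
  rw [goM1 (s.length + 1) s [] [] (by omega)]
  simp

theorem spOne_none (l : List Char) (h : (spOne l).2 = none) :
    (spOne l).1 = l ∧ spAll l = (l, []) := by
  induction l with
  | nil => simp [spOne, spAll]
  | cons c r ih =>
    by_cases hc : c = '\n'
    · subst hc; simp [spOne] at h
    · simp [spOne, spAll, hc] at h ⊢
      obtain ⟨h1, h2⟩ := ih h
      simp [h1, h2]

theorem spOne_some (l r : List Char) (h : (spOne l).2 = some r) :
    (spAll l).1 = (spOne l).1 ∧ (spAll l).2 = (spAll r).1 :: (spAll r).2 := by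
  induction l with
  | nil => simp [spOne] at h
  | cons c t ih =>
    by_cases hc : c = '\n'
    · subst hc
      simp [spOne] at h
      subst h
      simp [spOne, spAll]
    · simp [spOne, spAll, hc] at h ⊢
      exact ih h

theorem join_char_cons (c : Char) (p : List Char) (t : List (List Char)) :
    PySem.Chars.join ['\n'] ((c :: p) :: t) = c :: PySem.Chars.join ['\n'] (p :: t) := by
  cases t with
  | nil => rw [PySem.Chars.join_singleton, PySem.Chars.join_singleton]
  | cons b t' => rw [PySem.Chars.join_cons_cons, PySem.Chars.join_cons_cons]; simp

theorem join_spAll (l : List Char) :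
    PySem.Chars.join ['\n'] ((spAll l).1 :: (spAll l).2) = l := by
  induction l with
  | nil => rw [spAll, PySem.Chars.join_singleton]
  | cons c r ih =>
    by_cases hc : c = '\n'
    · subst hc
      have hsp : spAll ('\n' :: r) = ([], (spAll r).1 :: (spAll r).2) := by simp [spAll]
      rw [hsp]
      rw [PySem.Chars.join_cons_cons]
      simp [ih]
    · simp only [spAll, if_neg hc]
      rw [join_char_cons, ih]

theorem lstrip_nil_of_strip_nil (p : List Char) (h : PySem.Chars.strip p = []) :
    PySem.Chars.lstrip p = [] := by
  rw [PySem.Chars.strip, PySem.Chars.rstrip] at h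
  rw [PySem.Chars.lstrip]
  cases hy : List.dropWhile PySem.Chars.isspace p with
  | nil => rfl
  | cons c t =>
    exfalso
    have hne : List.dropWhile PySem.Chars.isspace p ≠ [] := by rw [hy]; simp
    have hf := List.head_dropWhile_not (p := PySem.Chars.isspace) (l := p) hne
    simp only [hy, List.head_cons] at hf
    have hrev : List.dropWhile PySem.Chars.isspace (PySem.Chars.lstrip p).reverse = [] := by
      rwa [List.reverse_eq_nil_iff] at h
    have hc : PySem.Chars.isspace c = true := by
      have hall := List.dropWhile_eq_nil_iff.mp hrev
      apply hall
      rw [PySem.Chars.lstrip, hy]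
      simp
    rw [hc] at hf
    exact absurd hf (by simp)

theorem strip_skip (p : List Char) (t : List (List Char)) (h : PySem.Chars.strip p = []) :
    PySem.Chars.strip (PySem.Chars.join ['\n'] (p :: t))
      = PySem.Chars.strip (PySem.Chars.join ['\n'] t) := by
  cases t with
  | nil =>
    rw [PySem.Chars.join_singleton, h]
    rw [PySem.Chars.join_nil]
    simp [PySem.Chars.strip, PySem.Chars.lstrip, PySem.Chars.rstrip]
  | cons b t' =>
    rw [PySem.Chars.join_cons_cons]
    have hl := lstrip_nil_of_strip_nil p h
    rw [PySem.Chars.strip, PySem.Chars.strip]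
    congr 1
    rw [PySem.Chars.lstrip, PySem.Chars.lstrip] at *
    have h1 : List.dropWhile PySem.Chars.isspace (p ++ ['\n']) = [] := by
      rw [List.dropWhile_append, hl]
      simp only [List.isEmpty_nil, if_true]
      decide
    rw [List.dropWhile_append, h1]
    simp

theorem pyRange_one_nil (a b : Int) (h : b ≤ a) : PySem.List.pyRange a b 1 = [] := by
  simp [PySem.List.pyRange]
  intro h2
  omega

theorem loop_drop (lines : List (List Char)) :
    ∀ (j k : Nat), 2 ≤ k → lines.length - k ≤ j → ∀ (acc : List (List Char)),
    (PySem.List.pyRange (k : Int) (lines.length : Int) 1).foldl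
      (fun acc i =>
        if i = 1 ∧ PySem.Chars.strip (PySem.List.pyGetD lines i []) = [] then acc
        else acc ++ [PySem.List.pyGetD lines i []]) acc
      = acc ++ lines.drop k := by
  intro j
  induction j with
  | zero =>
    intro k hk hj acc
    have hlen : lines.length ≤ k := by omega
    rw [pyRange_one_nil _ _ (by exact_mod_cast hlen)]
    simp [List.drop_eq_nil_of_le hlen]
  | succ m ih =>
    intro k hk hj acc
    by_cases hlt : k < lines.length
    · rw [PySem.List.pyRange_one_cons (by exact_mod_cast hlt)]
      simp only [List.foldl_cons]
      rw [if_neg (by simp; intro h1; omega)]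
      have : ((k : Int) + 1) = ((k + 1 : Nat) : Int) := by push_cast; ring
      rw [this, ih (k+1) (by omega) (by omega)]
      rw [PySem.List.pyGetD_natCast]
      rw [List.drop_eq_getElem_cons hlt]
      simp [List.getElem?_eq_getElem hlt]
    · have hlen : lines.length ≤ k := by omega
      rw [pyRange_one_nil _ _ (by exact_mod_cast hlen)]
      simp [List.drop_eq_nil_of_le hlen]

theorem strip_nil : PySem.Chars.strip [] = [] := rfl

theorem ab_eq (s : String) : parse_simple_docstring_py s = parse_simple_docstring_py_alt s := by
  rw [parse_simple_docstring_py, parse_simple_docstring_py_alt]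
  simp only [splitOn_eq, splitOnMax_eq]
  set l := s.toList with hl
  cases h2 : (spOne l).2 with
  | none =>
    obtain ⟨e1, e2⟩ := spOne_none l h2
    rw [e1, e2]
    have hr : PySem.List.pyRange (1 : Int) (([l] : List (List Char)).length : Int) 1 = [] := by
      apply pyRange_one_nil; simp
    simp only [List.length_cons] at hr ⊢
    simp [PySem.Chars.join_nil, strip_nil, PySem.List.pyGetD]
  | some r =>
    obtain ⟨e1, e2⟩ := spOne_some l r h2
    rw [e1, e2]
    set p := (spOne l).1 with hp
    set a := (spAll r).1 with ha
    set t := (spAll r).2 with ht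
    have hone : ((1 : Int)) = ((1 : Nat) : Int) := rfl
    have hget1 : PySem.List.pyGetD (p :: a :: t) (1 : Int) [] = a := by
      rw [hone, PySem.List.pyGetD_natCast]; rfl
    have hget0 : PySem.List.pyGetD (p :: a :: t) (0 : Int) [] = p := by
      rw [show ((0 : Int)) = ((0 : Nat) : Int) from rfl, PySem.List.pyGetD_natCast]; rfl
    have hcons : PySem.List.pyRange (1 : Int) ((p :: a :: t).length : Int) 1
        = (1 : Int) :: PySem.List.pyRange (1 + 1 : Int) ((p :: a :: t).length : Int) 1 := by
      apply PySem.List.pyRange_one_cons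
      simp only [List.length_cons]
      push_cast
      omega
    have htwo : ((1 + 1 : Int)) = ((2 : Nat) : Int) := rfl
    have hfold : (PySem.List.pyRange (1 : Int) ((p :: a :: t).length : Int) 1).foldl
        (fun acc i =>
          if i = 1 ∧ PySem.Chars.strip (PySem.List.pyGetD (p :: a :: t) i []) = [] then acc
          else acc ++ [PySem.List.pyGetD (p :: a :: t) i []]) []
        = if PySem.Chars.strip a = [] then t else a :: t := by
      rw [hcons, htwo]
      simp only [List.foldl_cons, hget1]
      by_cases hstrip : PySem.Chars.strip a = []
      · rw [if_pos ⟨trivial, hstrip⟩, loop_drop (p :: a :: t) (p :: a :: t).length 2 (by omega) (by omega)]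
        simp [hstrip]
      · rw [if_neg (by simp [hstrip]), loop_drop (p :: a :: t) (p :: a :: t).length 2 (by omega) (by omega)]
        simp [hstrip]
    have hjoin : PySem.Chars.strip (PySem.Chars.join ['\n']
        (if PySem.Chars.strip a = [] then t else a :: t)) = PySem.Chars.strip r := by
      by_cases hstrip : PySem.Chars.strip a = []
      · rw [if_pos hstrip, ← strip_skip a t hstrip, ha, ht, join_spAll]
      · rw [if_neg hstrip, ha, ht, join_spAll]
    have hget1' : PySem.List.pyGetD [p, r] (1 : Int) [] = r := by
      rw [hone, PySem.List.pyGetD_natCast]; rfl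
    rw [hfold]
    simp [hjoin, hget1']

-- ===== VERDICT (by name: the statement is the Claim_ definition above) =====
theorem parse_simple_docstring_py_spec : Claim_equal_parse_simple_docstring_py := by
  intro docstring _
  unfold Spec_parse_simple_docstring_py
  exact ab_eq docstring
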